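-- pv_equiv track=rewrite | github.com/kevinveenbirkenbach/infinito-nexus | tests/lint/repository/test_inline_script_block_size.py | _count_logical_lines
-- ===== SOURCE A (Python) =====
-- from typing import Iterable, List
--
-- def _count_logical_lines(body: List[str]) -> int:
--     """Count non-blank logical lines, collapsing trailing-``\\``
--     continuations into a single line.
--     """
--     count = 0
--     in_continuation = False
--     for raw in body:
--         if raw.strip() == "":
--             in_continuation = False
--             continue
--         if not in_continuation:
--             count += 1
--         # Trim trailing whitespace, then check if the line ends with `\`.
--         # An even number of trailing backslashes is an escaped backslash,
--         # NOT a continuation; odd number means continuation.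
--         stripped = raw.rstrip()
--         backslashes = len(stripped) - len(stripped.rstrip("\\"))
--         in_continuation = (backslashes % 2) == 1
--     return count
-- ===== SOURCE B (Python) =====
-- from typing import List
--
--
-- def _continues(line: str) -> bool:
--     """True if line ends (after rstrip) with an odd number of backslashes."""
--     s = line.rstrip()
--     k = len(s)
--     while k > 0 and s[k - 1] == "\\":
--         k -= 1
--     return (len(s) - k) % 2 == 1
--
--
-- def _count_logical_lines(body: List[str]) -> int:
--     # A line opens a new logical line iff it is non-blank and its
--     # predecessor is not a non-blank continuation line ("" stands in
--     # as the (blank) predecessor of the first line).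
--     return sum(
--         1
--         for prev, cur in zip([""] + body, body)
--         if cur.strip() != "" and not (prev.strip() != "" and _continues(prev))
--     )
-- ===== Notes on version B (the rewrite author's own statement) =====
-- stated objective: simpler
-- what changed: Replaces A's stateful fold carrying an in_continuation flag across iterations by a stateless pairwise count over the zip of body with itself shifted by one (a blank sentinel as predecessor of the first line): a line is counted iff it is non-blank and its predecessor is not a non-blank line ending in an odd number of backslashes.
import Mathlib
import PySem

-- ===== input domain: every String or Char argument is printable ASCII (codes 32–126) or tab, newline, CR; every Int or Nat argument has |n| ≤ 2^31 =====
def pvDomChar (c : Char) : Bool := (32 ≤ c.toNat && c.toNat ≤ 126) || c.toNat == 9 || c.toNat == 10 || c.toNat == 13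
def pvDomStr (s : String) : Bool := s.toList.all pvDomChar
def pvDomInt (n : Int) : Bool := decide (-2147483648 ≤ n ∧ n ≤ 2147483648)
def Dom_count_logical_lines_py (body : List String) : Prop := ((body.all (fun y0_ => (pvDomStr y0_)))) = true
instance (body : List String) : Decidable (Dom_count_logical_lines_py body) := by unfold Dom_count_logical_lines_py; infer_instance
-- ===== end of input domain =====

-- B replaces A's carried in_continuation flag by a stateless pairwise count over
-- (predecessor, line) pairs with a blank sentinel predecessor for the first line; objective: simpler (no mutable state threaded through the loop).

-- ===== PORT A =====
-- hand port of s.rstrip("\\") (single strip char, so exact): drop trailing backslashes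
def pvRstripBS (s : String) : String :=
  String.ofList ((s.toList.reverse.dropWhile (fun c => c == '\\')).reverse)

def count_logical_lines_py (body : List String) : Int :=
  (body.foldl
    (fun (st : Int × Bool) raw =>
      if PySem.Str.strip raw == "" then (st.1, false)
      else
        let count' := if st.2 then st.1 else st.1 + 1
        let stripped := PySem.Str.rstrip raw
        let backslashes := PySem.Str.len stripped - PySem.Str.len (pvRstripBS stripped)
        (count', PySem.Int.mod backslashes 2 == 1))
    (0, false)).1

-- ===== PORT B =====
-- port of Source B's _continues: count trailing backslashes of rstrip(line) by a
-- backwards scan (the while loop walking k down = takeWhile on the reversed chars)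
def pvCountTrailBS : List Char → Nat
  | [] => 0
  | c :: rest => if c == '\\' then pvCountTrailBS rest + 1 else 0

def pvContinues (line : String) : Bool :=
  pvCountTrailBS (PySem.Str.rstrip line).toList.reverse % 2 == 1

def count_logical_lines_py_alt (body : List String) : Int :=
  ((("" :: body).zip body).countP
    (fun p => PySem.Str.strip p.2 != "" && !(PySem.Str.strip p.1 != "" && pvContinues p.1)) : Int)

-- ===== PRECONDITION & SPEC =====
def Spec_count_logical_lines_py (body : List String) (out : Int) : Prop := out = count_logical_lines_py_alt body
instance (body : List String) (out : Int) : Decidable (Spec_count_logical_lines_py body out) := by unfold Spec_count_logical_lines_py; infer_instance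

-- ===== CLAIM (what is proved, stated in full; the proofs are below) =====
def Claim_equal_count_logical_lines_py : Prop := ∀ (body : List String), Dom_count_logical_lines_py body → Spec_count_logical_lines_py body (count_logical_lines_py body)

-- ===== LEMMAS AND PROOFS =====

-- the flag A carries after processing a line `prev`
def pvFlag (prev : String) : Bool :=
  PySem.Str.strip prev != "" && pvContinues prev

-- B's counting predicate, named for the proofs
def pvPred (p : String × String) : Bool :=
  PySem.Str.strip p.2 != "" && !(PySem.Str.strip p.1 != "" && pvContinues p.1)

lemma pvCountTrailBS_eq_takeWhile (cs : List Char) :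
    pvCountTrailBS cs = (cs.takeWhile (fun c => c == '\\')).length := by
  induction cs with
  | nil => rfl
  | cons c rest ih =>
    by_cases h : (c == '\\') = true <;>
      simp [pvCountTrailBS, h, ih]

-- A's backslash count equals B's trailing-backslash count
lemma pvBackslashes_eq (s : String) :
    PySem.Str.len s - PySem.Str.len (pvRstripBS s)
      = (pvCountTrailBS s.toList.reverse : Int) := by
  simp only [PySem.Str.len_eq, pvRstripBS, pvCountTrailBS_eq_takeWhile]
  have hlen : (s.toList.reverse.takeWhile (fun c => c == '\\')).length
      + (s.toList.reverse.dropWhile (fun c => c == '\\')).length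
      = s.toList.reverse.length := by
    rw [← List.length_append, List.takeWhile_append_dropWhile]
  rw [String.toList_ofList, List.length_reverse] at *
  have hst : s.toList.length = s.length := String.length_toList
  omega

-- A's in_continuation update on a non-blank line equals B's pvContinues
lemma pvParity_eq (raw : String) :
    (PySem.Int.mod (PySem.Str.len (PySem.Str.rstrip raw)
        - PySem.Str.len (pvRstripBS (PySem.Str.rstrip raw))) 2 == 1)
      = pvContinues raw := by
  rw [pvBackslashes_eq, PySem.Int.mod_eq_emod_of_pos (by norm_num)]
  simp only [pvContinues]
  rw [Bool.eq_iff_iff]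
  simp only [beq_iff_eq]
  omega

-- A's loop body, named for the proofs (definitionally the port's lambda)
def pvStepA : Int × Bool → String → Int × Bool := fun st raw =>
  if PySem.Str.strip raw == "" then (st.1, false)
  else
    let count' := if st.2 then st.1 else st.1 + 1
    let stripped := PySem.Str.rstrip raw
    let backslashes := PySem.Str.len stripped - PySem.Str.len (pvRstripBS stripped)
    (count', PySem.Int.mod backslashes 2 == 1)

-- one step of A's fold, started at the flag left by `prev`
lemma pvStep_eq (c : Int) (prev x : String) :
    pvStepA (c, pvFlag prev) x
    = (c + (if pvPred (prev, x) then 1 else 0), pvFlag x) := by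
  unfold pvStepA
  by_cases hb : PySem.Str.strip x = ""
  · simp [hb, pvPred, pvFlag]
  · have hb' : (PySem.Str.strip x == "") = false := by simp [hb]
    have hbne : (PySem.Str.strip x != "") = true := by simp [hb]
    have hfx : pvFlag x = pvContinues x := by simp [pvFlag, hbne]
    have hpp : pvPred (prev, x) = !pvFlag prev := by
      simp [pvPred, pvFlag, hbne]
    simp only [hb', Bool.false_eq_true, if_false, pvParity_eq, hfx, hpp]
    cases hf : pvFlag prev
    · simp
    · simp

-- loop invariant: A's fold started with flag = pvFlag prev counts the zip pairs
lemma pvFold_eq (xs : List String) : ∀ (c : Int) (prev : String),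
    (xs.foldl pvStepA (c, pvFlag prev)).1
    = c + (((prev :: xs).zip xs).countP pvPred : Int) := by
  induction xs with
  | nil =>
    intro c prev
    rw [List.foldl_nil, List.zip_nil_right, List.countP_nil]
    simp
  | cons x rest ih =>
    intro c prev
    rw [List.foldl_cons, pvStep_eq c prev x, ih, List.zip_cons_cons,
      List.countP_cons]
    push_cast
    ring

-- ===== VERDICT (by name: the statement is the Claim_ definition above) =====
theorem count_logical_lines_py_spec : Claim_equal_count_logical_lines_py := by
  intro body _
  unfold Spec_count_logical_lines_py count_logical_lines_py count_logical_lines_py_alt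
  have h : (body.foldl pvStepA ((0 : Int), pvFlag "")).1
      = 0 + (((("" :: body)).zip body).countP pvPred : Int) := pvFold_eq body 0 ""
  have h0 : pvFlag "" = false := by decide
  rw [h0] at h
  rw [show (fun (st : Int × Bool) raw =>
      if PySem.Str.strip raw == "" then (st.1, false)
      else
        let count' := if st.2 then st.1 else st.1 + 1
        let stripped := PySem.Str.rstrip raw
        let backslashes := PySem.Str.len stripped - PySem.Str.len (pvRstripBS stripped)
        (count', PySem.Int.mod backslashes 2 == 1)) = pvStepA from rfl]
  rw [h]
  have hpq : (("" :: body).zip body).countP pvPred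
      = (("" :: body).zip body).countP
          (fun p => PySem.Str.strip p.2 != "" && !(PySem.Str.strip p.1 != "" && pvContinues p.1)) := rfl
  rw [hpq]
  ring
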